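-- pv_equiv track=rewrite | github.com/mhschubert/Portfolio | classifier_outcome_comparison/utils/ml_utils.py | subslice_weights
-- ===== SOURCE A (Python) =====
-- def subslice_weights(featuretypes, slice_inds):
--     #makes a flat list of all indices to select in weight matrix (i.e. all those with vocabs)
--     selector = []
--     offset = 0
--     for i, typ in enumerate(featuretypes):
--         if not typ in ['emoticon_c''polarity', 'num']:
--             selector.append([el+offset for el in slice_inds[i]])
--         offset += slice_inds[i][-1]
--
--     return selector
-- ===== SOURCE B (Python) =====
-- def subslice_weights(featuretypes, slice_inds):
--     # Back-to-front: walk the feature types in reverse; at each step shift the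
--     # whole output built so far by this slice's last element, then prepend this
--     # slice (unshifted) if its type is kept.  No offsets are ever computed.
--     out = []
--     for i in range(len(featuretypes) - 1, -1, -1):
--         shift = slice_inds[i][-1]
--         out = [[el + shift for el in sub] for sub in out]
--         if featuretypes[i] not in ('emoticon_cpolarity', 'num'):
--             out.insert(0, list(slice_inds[i]))
--     return out
-- ===== Notes on version B (the rewrite author's own statement) =====
-- stated objective: alternative
-- what changed: Builds the result back-to-front: iterates the feature types in reverse, re-shifting the already-built output by each slice's last element and prepending kept slices unshifted, so no offset accumulator or prefix sum exists at all.
import Mathlib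
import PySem

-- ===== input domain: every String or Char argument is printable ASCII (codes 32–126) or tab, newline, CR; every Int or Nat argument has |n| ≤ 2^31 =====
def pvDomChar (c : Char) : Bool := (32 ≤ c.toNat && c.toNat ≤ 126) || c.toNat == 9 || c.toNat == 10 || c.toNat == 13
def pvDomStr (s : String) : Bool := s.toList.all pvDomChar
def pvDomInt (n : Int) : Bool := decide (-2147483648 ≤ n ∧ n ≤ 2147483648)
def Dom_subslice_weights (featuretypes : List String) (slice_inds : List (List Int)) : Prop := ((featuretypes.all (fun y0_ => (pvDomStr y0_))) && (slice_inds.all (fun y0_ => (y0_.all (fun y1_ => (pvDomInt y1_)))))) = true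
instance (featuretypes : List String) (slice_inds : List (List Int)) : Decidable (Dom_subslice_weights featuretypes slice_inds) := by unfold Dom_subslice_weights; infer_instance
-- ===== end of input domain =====

-- B replaces A's forward loop with a running offset by a back-to-front build:
-- it walks the feature types in reverse, re-shifting the output built so far by
-- each slice's last element and prepending kept slices unshifted (objective:
-- alternative decomposition; no offset/prefix sum is computed).

-- ===== PORT A =====
-- literal port of A: one loop over enumerate(featuretypes) carrying (selector, offset)
def subslice_weights (featuretypes : List String) (slice_inds : List (List Int)) : List (List Int) :=
  ((PySem.List.enumerate featuretypes).foldl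
    (fun (st : List (List Int) × Int) p =>
      ((if p.2 == "emoticon_cpolarity" || p.2 == "num" then st.1
        else st.1 ++ [(PySem.List.pyGetD slice_inds p.1 []).map (fun el => el + st.2)]),
       st.2 + PySem.List.pyGetD (PySem.List.pyGetD slice_inds p.1 []) (-1) 0))
    ([], 0)).1

-- ===== PORT B =====
-- literal port of Source B: reverse loop over range(len-1, -1, -1); shift current
-- output by slice_inds[i][-1], then prepend slice_inds[i] if the type is kept
def subslice_weights_alt (featuretypes : List String) (slice_inds : List (List Int)) : List (List Int) :=
  (PySem.List.pyRange ((featuretypes.length : Int) - 1) (-1) (-1)).foldl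
    (fun (out : List (List Int)) i =>
      let shift := PySem.List.pyGetD (PySem.List.pyGetD slice_inds i []) (-1) 0
      let out' := out.map (fun sub => sub.map (fun el => el + shift))
      if PySem.List.pyGetD featuretypes i "" == "emoticon_cpolarity" ||
         PySem.List.pyGetD featuretypes i "" == "num" then out'
      else PySem.List.pyGetD slice_inds i [] :: out')
    []

-- ===== PRECONDITION & SPEC =====
-- Pre_ excludes exactly the inputs on which the Python A raises IndexError:
-- slice_inds shorter than featuretypes, or an empty slice_inds[i] for some visited i.
def Pre_subslice_weights (featuretypes : List String) (slice_inds : List (List Int)) : Prop :=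
  featuretypes.length ≤ slice_inds.length ∧
  ∀ l ∈ slice_inds.take featuretypes.length, l ≠ []

instance (featuretypes : List String) (slice_inds : List (List Int)) : Decidable (Pre_subslice_weights featuretypes slice_inds) := by unfold Pre_subslice_weights; infer_instance

def pvWitness_subslice_weights : List String × List (List Int) :=
  (["word", "num", "polarity"], [[0, 1, 2], [0, 3], [0, 2]])

def Spec_subslice_weights (featuretypes : List String) (slice_inds : List (List Int)) (out : List (List Int)) : Prop := out = subslice_weights_alt featuretypes slice_inds
instance (featuretypes : List String) (slice_inds : List (List Int)) (out : List (List Int)) : Decidable (Spec_subslice_weights featuretypes slice_inds out) := by unfold Spec_subslice_weights; infer_instance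

-- ===== CLAIM (what is proved, stated in full; the proofs are below) =====
def Claim_equal_subslice_weights : Prop := ∀ (featuretypes : List String) (slice_inds : List (List Int)), Dom_subslice_weights featuretypes slice_inds → Pre_subslice_weights featuretypes slice_inds → Spec_subslice_weights featuretypes slice_inds (subslice_weights featuretypes slice_inds)

-- ===== LEMMAS AND PROOFS =====

-- forward reference computation: A's loop, structurally over the (type, slice) pairs
def pvGoZip : List (String × List Int) → Int → List (List Int) × Int
  | [], off => ([], off)
  | (t, sl) :: r, off =>
    let res := pvGoZip r (off + PySem.List.pyGetD sl (-1) 0)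
    ((if t == "emoticon_cpolarity" || t == "num" then [] else [sl.map (fun el => el + off)]) ++ res.1,
     res.2)

-- backward reference computation: B's loop, structurally
def pvGoB : List (String × List Int) → List (List Int)
  | [] => []
  | (t, sl) :: r =>
    let shifted := (pvGoB r).map (fun sub => sub.map (fun el => el + PySem.List.pyGetD sl (-1) 0))
    if t == "emoticon_cpolarity" || t == "num" then shifted else sl :: shifted

theorem pvIndexMid {α : Type} (d : α) (pre : List α) (x : α) (post : List α) :
    PySem.List.pyGetD (pre ++ x :: post) (pre.length : Int) d = x := by
  rw [PySem.List.pyGetD_natCast]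
  simp [List.getD]

-- the forward recursion at offset `off` is the backward one shifted by `off`
theorem pvGoZip_eq_goB (l : List (String × List Int)) : ∀ (off : Int),
    (pvGoZip l off).1 = (pvGoB l).map (fun sub => sub.map (fun el => el + off)) := by
  induction l with
  | nil => intro off; simp [pvGoZip, pvGoB]
  | cons p r ih =>
    intro off
    obtain ⟨t, sl⟩ := p
    simp only [pvGoZip, pvGoB, ih]
    by_cases hc : (t == "emoticon_cpolarity" || t == "num") = true <;>
      (simp [hc, List.map_map, Function.comp_def]; intros; ring)

-- A's fold over enumerate equals the forward structural recursion
theorem pvFoldA (sls : List (List Int)) (fts : List String) :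
    ∀ (pre rest suf : List (List Int)) (acc : List (List Int)) (off : Int),
    sls = pre ++ rest ++ suf → fts.length = rest.length →
    (PySem.List.enumerate fts (pre.length : Int)).foldl
      (fun (st : List (List Int) × Int) p =>
        ((if p.2 == "emoticon_cpolarity" || p.2 == "num" then st.1
          else st.1 ++ [(PySem.List.pyGetD sls p.1 []).map (fun el => el + st.2)]),
         st.2 + PySem.List.pyGetD (PySem.List.pyGetD sls p.1 []) (-1) 0))
      (acc, off)
    = (acc ++ (pvGoZip (fts.zip rest) off).1, (pvGoZip (fts.zip rest) off).2) := by
  induction fts with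
  | nil => intro pre rest suf acc off _ _; simp [pvGoZip]
  | cons t fts' ih =>
    intro pre rest suf acc off hsplit hlen
    cases rest with
    | nil => simp at hlen
    | cons sl rest' =>
      have hidx : PySem.List.pyGetD sls (pre.length : Int) [] = sl := by
        rw [hsplit, List.append_assoc]; exact pvIndexMid [] pre sl (rest' ++ suf)
      rw [PySem.List.enumerate_cons, List.foldl_cons]
      simp only [hidx]
      have hsplit' : sls = (pre ++ [sl]) ++ rest' ++ suf := by simp [hsplit]
      have hcast : (pre.length : Int) + 1 = (((pre ++ [sl]).length : Nat) : Int) := by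
        simp
      rw [hcast, ih (pre ++ [sl]) rest' suf _ _ hsplit' (by simpa using hlen)]
      by_cases hc : (t == "emoticon_cpolarity" || t == "num") = true <;>
        simp [pvGoZip, hc]

-- B's reverse fold equals the backward structural recursion
theorem pvFoldB (sls : List (List Int)) (fts : List String) (restF : List String) :
    ∀ (preF : List String) (pre rest suf : List (List Int)),
    fts = preF ++ restF → sls = pre ++ rest ++ suf →
    preF.length = pre.length → restF.length = rest.length →
    ((PySem.List.pyRange (preF.length : Int) (fts.length : Int) 1).reverse).foldl
      (fun (out : List (List Int)) i =>
        let shift := PySem.List.pyGetD (PySem.List.pyGetD sls i []) (-1) 0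
        let out' := out.map (fun sub => sub.map (fun el => el + shift))
        if PySem.List.pyGetD fts i "" == "emoticon_cpolarity" ||
           PySem.List.pyGetD fts i "" == "num" then out'
        else PySem.List.pyGetD sls i [] :: out')
      []
    = pvGoB (restF.zip rest) := by
  induction restF with
  | nil =>
    intro preF pre rest suf hF _ hlen _
    have : (preF.length : Int) = (fts.length : Int) := by simp [hF]
    rw [this, PySem.List.pyRange_one_eq_nil (le_refl _)]
    simp [pvGoB]
  | cons t restF' ih =>
    intro preF pre rest suf hF hsplit hlen hlen2
    cases rest with
    | nil => simp at hlen2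
    | cons sl rest' =>
      have hlt : (preF.length : Int) < (fts.length : Int) := by
        simp [hF]
      rw [PySem.List.pyRange_one_cons hlt, List.reverse_cons, List.foldl_append]
      have hcast : (preF.length : Int) + 1 = (((preF ++ [t]).length : Nat) : Int) := by simp
      have hF' : fts = (preF ++ [t]) ++ restF' := by simp [hF]
      have hsplit' : sls = (pre ++ [sl]) ++ rest' ++ suf := by simp [hsplit]
      rw [hcast, ih (preF ++ [t]) (pre ++ [sl]) rest' suf hF' hsplit'
        (by simp [hlen]) (by simpa using hlen2)]
      have hidxS : PySem.List.pyGetD sls (preF.length : Int) [] = sl := by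
        rw [hsplit, List.append_assoc, hlen]; exact pvIndexMid [] pre sl (rest' ++ suf)
      have hidxF : PySem.List.pyGetD fts (preF.length : Int) "" = t := by
        rw [hF]; exact pvIndexMid "" preF t restF'
      simp only [List.foldl_cons, List.foldl_nil, hidxS, hidxF]
      by_cases hc : (t == "emoticon_cpolarity" || t == "num") = true <;>
        simp [pvGoB, hc]

-- ===== VERDICT (by name: the statement is the Claim_ definition above) =====
theorem subslice_weights_spec : Claim_equal_subslice_weights := by
  intro fts sls _ hpre
  unfold Spec_subslice_weights subslice_weights subslice_weights_alt
  have hlen : fts.length ≤ sls.length := hpre.1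
  have hsplit : sls = [] ++ sls.take fts.length ++ sls.drop fts.length := by simp
  have hlen' : fts.length = (sls.take fts.length).length := by
    simp [List.length_take]; omega
  have hrev : PySem.List.pyRange ((fts.length : Int) - 1) (-1) (-1)
      = (PySem.List.pyRange 0 (fts.length : Int) 1).reverse := by
    rw [PySem.List.pyRange_neg_one_eq_reverse]; norm_num
  have hA := pvFoldA sls fts [] (sls.take fts.length) (sls.drop fts.length) [] 0
    hsplit hlen'
  have hB := pvFoldB sls fts fts [] [] (sls.take fts.length) (sls.drop fts.length)
    (by simp) hsplit rfl hlen'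
  simp only [List.length_nil, Nat.cast_zero] at hA hB
  rw [hA, hrev, hB, pvGoZip_eq_goB]
  simp
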